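-- pv_equiv track=rewrite | github.com/SankalpSTG/DSA-Google-Sheet | arrays/9.py | driver
-- ===== SOURCE A (Python) =====
-- def driver(N, arr):
--     posArr = []
--     negArr = []
--     index = 0
--     for element in arr:
--         if element >= 0:
--             posArr.append(element)
--         else:
--             negArr.append(element)
--     posArr.extend(negArr)
--     return " ".join([str(x) for x in posArr])
-- ===== SOURCE B (Python) =====
-- def driver(N, arr):
--     return " ".join(str(x) for x in sorted(arr, key=lambda x: x < 0))
-- ===== Notes on version B (the rewrite author's own statement) =====
-- stated objective: idiomatic
-- what changed: Replaces the two-bucket append loop plus extend with a single stable sort keyed by (x < 0), whose stability reproduces positives-then-negatives in original order, followed by one join.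
import Mathlib
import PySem

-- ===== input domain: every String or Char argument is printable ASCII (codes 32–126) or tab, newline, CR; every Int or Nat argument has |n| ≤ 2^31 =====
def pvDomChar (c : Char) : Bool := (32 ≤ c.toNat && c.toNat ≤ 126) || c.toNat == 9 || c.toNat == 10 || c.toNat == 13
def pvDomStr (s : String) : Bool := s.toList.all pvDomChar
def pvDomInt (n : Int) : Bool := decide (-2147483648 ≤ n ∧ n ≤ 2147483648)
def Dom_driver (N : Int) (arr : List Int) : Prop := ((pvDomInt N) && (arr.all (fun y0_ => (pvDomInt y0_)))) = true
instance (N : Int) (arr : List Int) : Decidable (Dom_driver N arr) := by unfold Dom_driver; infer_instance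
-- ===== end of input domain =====

-- B replaces A's two-bucket append loop with one stable sort keyed by (x < 0) followed by a join (idiomatic; same result).


-- ===== PORT A =====
-- literal port of A: one loop splitting into posArr/negArr by append, extend, then join
def driver (_N : Int) (arr : List Int) : String :=
  let s := arr.foldl
    (fun (acc : List Int × List Int) element =>
      if element ≥ 0 then (acc.1 ++ [element], acc.2) else (acc.1, acc.2 ++ [element]))
    ([], [])
  PySem.Str.join " " ((s.1 ++ s.2).map PySem.Int.toStr)

-- ===== PORT B =====
-- literal port of B: stable sort with boolean key (x < 0), then join
def driver_alt (_N : Int) (arr : List Int) : String :=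
  PySem.Str.join " "
    ((PySem.List.sorted arr (fun x => decide (x < 0)) false).map PySem.Int.toStr)

-- ===== PRECONDITION & SPEC =====
def Spec_driver (N : Int) (arr : List Int) (out : String) : Prop := out = driver_alt N arr
instance (N : Int) (arr : List Int) (out : String) : Decidable (Spec_driver N arr out) := by unfold Spec_driver; infer_instance

-- ===== CLAIM (what is proved, stated in full; the proofs are below) =====
def Claim_equal_driver : Prop := ∀ (N : Int) (arr : List Int), Dom_driver N arr → Spec_driver N arr (driver N arr)

-- ===== LEMMAS AND PROOFS =====

-- inserting a false-key element lands just before the (all-true-key) tail B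
theorem insertBy_false_key {α : Type} (key : α → Bool) (x : α) (hx : key x = false) :
    ∀ (A B : List α), (∀ a ∈ A, key a = false) → (∀ b ∈ B, key b = true) →
      PySem.List.insertBy (fun a b => decide (key a < key b)) x (A ++ B) = A ++ x :: B := by
  intro A
  induction A with
  | nil =>
    intro B _ hB
    cases B with
    | nil => simp [PySem.List.insertBy]
    | cons b bs => simp [PySem.List.insertBy, hx, hB b (by simp)]
  | cons a as ih =>
    intro B hA hB
    have ha : key a = false := hA a (by simp)
    simp [PySem.List.insertBy, hx, ha, ih B (fun y hy => hA y (by simp [hy])) hB]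

-- the insertion-sort fold with boolean key keeps false-key elements before true-key ones, stably
theorem foldl_insertBy_split {α : Type} (key : α → Bool) :
    ∀ (xs A B : List α), (∀ a ∈ A, key a = false) → (∀ b ∈ B, key b = true) →
      xs.foldl (fun acc x => PySem.List.insertBy (fun a b => decide (key a < key b)) x acc) (A ++ B)
        = (A ++ xs.filter (fun x => !key x)) ++ (B ++ xs.filter key) := by
  intro xs
  induction xs with
  | nil => intro A B _ _; simp
  | cons x xs ih =>
    intro A B hA hB
    by_cases hx : key x = true
    · have h1 : PySem.List.insertBy (fun a b => decide (key a < key b)) x (A ++ B)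
          = (A ++ B) ++ [x] := by
        apply PySem.List.insertBy_of_forall_not_before
        intro y _; simp [hx]
      have h2 : (A ++ B) ++ [x] = A ++ (B ++ [x]) := by simp
      simp only [List.foldl_cons, h1, h2]
      rw [ih A (B ++ [x]) hA (by intro b hb; rcases List.mem_append.mp hb with h | h
                                 · exact hB b h
                                 · simp at h; simpa [h])]
      simp [hx]
    · have hx' : key x = false := by simpa using hx
      simp only [List.foldl_cons, insertBy_false_key key x hx' A B hA hB]
      have h2 : A ++ x :: B = (A ++ [x]) ++ B := by simp
      rw [h2, ih (A ++ [x]) B (by intro a ha; rcases List.mem_append.mp ha with h | h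
                                  · exact hA a h
                                  · simp at h; simpa [h]) hB]
      simp [hx']

-- A's fold builds the two filters by repeated appends
theorem foldA_split : ∀ (xs : List Int) (pos neg : List Int),
    xs.foldl (fun (acc : List Int × List Int) element =>
        if element ≥ 0 then (acc.1 ++ [element], acc.2) else (acc.1, acc.2 ++ [element]))
      (pos, neg)
    = (pos ++ xs.filter (fun x => decide (0 ≤ x)), neg ++ xs.filter (fun x => decide (x < 0))) := by
  intro xs
  induction xs with
  | nil => intro pos neg; simp
  | cons x xs ih =>
    intro pos neg
    by_cases hx : 0 ≤ x
    · simp [List.foldl_cons, hx, ih, not_lt.mpr hx]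
    · simp [List.foldl_cons, hx, ih, lt_of_not_ge hx]

theorem sorted_neg_key (arr : List Int) :
    PySem.List.sorted arr (fun x => decide (x < 0)) false
      = arr.filter (fun x => decide (0 ≤ x)) ++ arr.filter (fun x => decide (x < 0)) := by
  rw [PySem.List.sorted_eq_foldl_insertBy]
  have h := foldl_insertBy_split (fun x : Int => decide (x < 0)) arr [] [] (by simp) (by simp)
  simp only [List.nil_append, List.append_nil] at h
  rw [h]
  congr 1
  · apply List.filter_congr
    intro x _
    simp only [← decide_not, decide_eq_decide]
    omega

-- ===== VERDICT (by name: the statement is the Claim_ definition above) =====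
theorem driver_spec : Claim_equal_driver := by
  intro N arr _
  unfold Spec_driver driver driver_alt
  rw [sorted_neg_key, foldA_split]
  simp
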